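-- pv_equiv track=rewrite | github.com/Iusto/pgms | 과일 장수.py | solution
-- ===== SOURCE A (Python) =====
-- def solution(k, m, score):
--     answer = 0
--     score.sort(reverse=True) #내림차순으로 정렬
--     apple_box = []
--     for i in range(0, len(score), m): #m만큼 apple_box를 담음, 나머지도 담음
--         apple_box.append(score[i:i+m])
--     for apple in apple_box:
--         if len(apple) == m: #m만큼의 길이만 answer에 합치기
--             answer += min(apple) * m #(최저 사과 점수) x (한 상자에 담긴 사과 개수) x (상자의 개수)
--     return answer
-- ===== SOURCE B (Python) =====
-- def solution(k, m, score):
--     # After sorting descending, the minimum of each full box of m is the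
--     # element at index m-1, 2m-1, ...; sum those via one slice.
--     if m <= 0:
--         return 0
--     s = sorted(score, reverse=True)
--     return m * sum(s[m - 1::m])
-- ===== Notes on version B (the rewrite author's own statement) =====
-- stated objective: simpler
-- what changed: B drops A's chunk-building loop and per-chunk min() scan: after the descending sort the minimum of each full box of m is the element at index m-1, 2m-1, ..., so B computes m * sum(s[m-1::m]) with one strided slice.
import Mathlib
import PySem

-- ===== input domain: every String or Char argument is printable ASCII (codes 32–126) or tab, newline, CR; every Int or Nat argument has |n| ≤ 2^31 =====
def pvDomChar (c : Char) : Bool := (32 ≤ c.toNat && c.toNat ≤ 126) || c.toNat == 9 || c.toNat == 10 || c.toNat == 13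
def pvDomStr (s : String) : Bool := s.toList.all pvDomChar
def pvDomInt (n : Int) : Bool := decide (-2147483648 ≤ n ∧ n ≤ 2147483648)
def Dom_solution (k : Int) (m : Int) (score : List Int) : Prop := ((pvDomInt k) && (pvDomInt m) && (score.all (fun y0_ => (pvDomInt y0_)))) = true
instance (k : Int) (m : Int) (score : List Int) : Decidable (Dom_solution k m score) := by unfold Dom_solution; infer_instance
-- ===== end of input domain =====

-- B replaces A's chunk-building loop and per-chunk min by one strided slice:
-- after a descending sort the minimum of each full box of m is the element at
-- index m-1, 2m-1, …, so the answer is m * sum(s[m-1::m]).  (Objective: simpler.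
-- A sorts `score` in place; B does not mutate — equivalence is about the return value.)

-- ===== PORT A =====
def solution (k : Int) (m : Int) (score : List Int) : Int :=
  let s := PySem.List.sorted score (fun x => x) true       -- score.sort(reverse=True)
  let appleBox := (PySem.List.pyRange 0 (PySem.List.len s) m).foldl
      (fun box i => box ++ [PySem.List.slice s (some i) (some (i + m))]) []
  appleBox.foldl
    (fun answer apple =>
      if (apple.length : Int) = m then
        match PySem.List.min? apple (fun x => x) with
        | some v => answer + v * m
        | none => answer   -- min([]) raises ValueError; reachable only for m = 0, excluded by Pre_
      else answer) 0

-- ===== PORT B =====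
def solution_alt (k : Int) (m : Int) (score : List Int) : Int :=
  if m > 0 then
    let s := PySem.List.sorted score (fun x => x) true
    m * ((PySem.List.slice? s (some (m - 1)) none m).getD []).sum
  else 0

-- ===== PRECONDITION & SPEC =====
-- Pre_ excludes exactly m = 0, on which A raises ValueError (range step 0).
def Pre_solution (k : Int) (m : Int) (score : List Int) : Prop := m ≠ 0
instance (k : Int) (m : Int) (score : List Int) : Decidable (Pre_solution k m score) := by unfold Pre_solution; infer_instance
def pvWitness_solution : Int × Int × List Int := (10, 3, [4, 1, 2, 2, 3, 3, 1])

def Spec_solution (k : Int) (m : Int) (score : List Int) (out : Int) : Prop := out = solution_alt k m score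
instance (k : Int) (m : Int) (score : List Int) (out : Int) : Decidable (Spec_solution k m score out) := by unfold Spec_solution; infer_instance

-- ===== CLAIM (what is proved, stated in full; the proofs are below) =====
def Claim_equal_solution : Prop := ∀ (k : Int) (m : Int) (score : List Int), Dom_solution k m score → Pre_solution k m score → Spec_solution k m score (solution k m score)
-- ===== LEMMAS AND PROOFS =====

-- minimum value of a nonempty descending list is its last element
lemma min_last (l : List Int) (hp : List.Pairwise (fun a b => b ≤ a) l) (h : 0 < l.length) :
    PySem.List.min? l (fun x => x) = some (l[l.length - 1]'(by omega)) := by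
  obtain ⟨v, hv⟩ : ∃ v, PySem.List.min? l (fun x => x) = some v := by
    cases hmin : PySem.List.min? l (fun x => x) with
    | none =>
        have := (PySem.List.min?_eq_none_iff l (fun x => x)).mp hmin
        simp [this] at h
    | some v => exact ⟨v, rfl⟩
  have hle : v ≤ l[l.length - 1]'(by omega) :=
    PySem.List.min?_isMin hv _ (l.getElem_mem _)
  have hmem := PySem.List.min?_mem hv
  obtain ⟨i, hi, hiv⟩ := List.mem_iff_getElem.mp hmem
  have hge : l[l.length - 1]'(by omega) ≤ v := by
    rcases Nat.lt_or_ge i (l.length - 1) with hlt | hge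
    · have := (List.pairwise_iff_getElem.mp hp) i (l.length - 1) hi (by omega) hlt
      omega
    · have : i = l.length - 1 := by omega
      subst this; omega
  rw [hv]
  exact congrArg some (le_antisymm hle hge)

-- the strided slice s[m-1::m] lists the last elements of the full chunks
lemma sliceB (s : List Int) (mn : Nat) (h1 : 1 ≤ mn) :
    (PySem.List.slice? s (some ((mn : Int) - 1)) none (mn : Int)).getD []
      = (List.range (s.length / mn)).map (fun k => s.getD (mn * k + mn - 1) 0) := by
  have hm0 : (mn : Int) ≠ 0 := by exact_mod_cast Nat.one_le_iff_ne_zero.mp h1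
  have hmpos : (0:Int) < (mn:Int) := by exact_mod_cast h1
  have hlt : ¬((mn:Int) < 0) := by omega
  have hge : ¬((mn:Int) - 1 < 0) := by omega
  simp only [PySem.List.slice?, PySem.List.sliceIndices, if_neg hm0, if_neg hlt, if_neg hge, if_pos hmpos]
  rcases lt_or_ge ((mn:Int) - 1) (s.length : Int) with hc | hc
  · have hmin : min ((mn:Int) - 1) (s.length:Int) = (mn:Int) - 1 := min_eq_left (by omega)
    rw [hmin, if_pos hc]
    have harith : (s.length:Int) - ((mn:Int) - 1) + (mn:Int) - 1 = (s.length:Int) := by ring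
    rw [harith]
    have hcount : (((s.length:Int)) / (mn:Int)).toNat = s.length / mn := by
      rw [← Int.natCast_ediv]; exact Int.toNat_natCast _
    rw [hcount, Option.getD_some]
    apply List.filterMap_eq_map_iff_forall_eq_some.mpr
    intro x hx
    have hxlt : x < s.length / mn := List.mem_range.mp hx
    have hidx : mn * (x + 1) ≤ s.length := by
      calc mn * (x + 1) ≤ mn * (s.length / mn) := by
            exact Nat.mul_le_mul_left mn (by omega)
        _ ≤ s.length := Nat.mul_div_le s.length mn
    have hmx : ((mn:Int) * (x:Int)) = ((mn * x : Nat) : Int) := by push_cast; ring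
    have hmx1 : mn * (x + 1) = mn * x + mn := by ring
    have htn : ((mn:Int) - 1 + (mn:Int) * (x:Int)).toNat = mn * x + mn - 1 := by
      rw [hmx]; omega
    have hlt2 : mn * x + mn - 1 < s.length := by omega
    rw [htn, List.getElem?_eq_getElem hlt2, List.getD_eq_getElem]
  · have hmin : min ((mn:Int) - 1) (s.length:Int) = (s.length:Int) := min_eq_right (by omega)
    rw [hmin, if_neg (lt_irrefl _)]
    have : s.length / mn = 0 := Nat.div_eq_of_lt (by omega)
    simp [this]

-- A's two loops, for step m ≥ 1, compute m * (sum of the last elements of the full chunks)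
lemma solA (s : List Int) (mn : Nat) (h1 : 1 ≤ mn)
    (hp : List.Pairwise (fun a b => b ≤ a) s) :
    ((PySem.List.pyRange 0 (PySem.List.len s) (mn : Int)).foldl
        (fun box i => box ++ [PySem.List.slice s (some i) (some (i + (mn : Int)))]) []).foldl
      (fun answer apple =>
        if (apple.length : Int) = (mn : Int) then
          match PySem.List.min? apple (fun x => x) with
          | some v => answer + v * (mn : Int)
          | none => answer
        else answer) 0
      = ((List.range (s.length / mn)).map (fun k => s.getD (mn * k + mn - 1) 0)).sum * (mn : Int) := by
  have hmpos : (0:Int) < (mn:Int) := by exact_mod_cast h1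
  set n := s.length with hn
  -- step 1: the index range
  rw [PySem.List.len_eq, PySem.List.pyRange_of_pos 0 (n:Int) hmpos]
  -- step 2-3: appleBox as a map
  rw [PySem.List.foldl_append_singleton_eq_map, List.nil_append, List.map_map]
  -- step 4: accumulate-add form of the second loop
  have hbody : (fun (answer : Int) (apple : List Int) =>
      if (apple.length : Int) = (mn : Int) then
        match PySem.List.min? apple (fun x => x) with
        | some v => answer + v * (mn : Int)
        | none => answer
      else answer)
      = (fun answer apple => answer +
          (if (apple.length : Int) = (mn : Int) then
            match PySem.List.min? apple (fun x => x) with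
            | some v => v * (mn : Int)
            | none => 0
          else 0)) := by
    funext a apple
    split_ifs with hfull
    · cases PySem.List.min? apple (fun x => x) <;> simp
    · simp
  rw [hbody, PySem.List.foldl_add, List.map_map, zero_add]
  -- chunk description
  have hchunk : ∀ k : Nat, PySem.List.slice s (some ((0:Int) + (mn:Int) * (k:Int)))
      (some ((0:Int) + (mn:Int) * (k:Int) + (mn:Int))) = (s.drop (mn*k)).take mn := by
    intro k
    have e1 : (0:Int) + (mn:Int) * (k:Int) = ((mn*k : Nat) : Int) := by push_cast; ring
    rw [e1]
    exact PySem.List.slice_natCast_add s (mn*k) mn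
  simp only [Function.comp_def]
  simp only [hchunk]
  -- both list sums as Finset sums
  have bridge : ∀ (c : Nat) (f : Nat → Int), ((List.range c).map f).sum = ∑ i ∈ Finset.range c, f i :=
    fun _ _ => rfl
  rw [bridge, bridge]
  set cA := (if (0:Int) < (n:Int) then (((n:Int) - 0 + (mn:Int) - 1) / (mn:Int)).toNat else 0) with hcA
  set cN := n / mn with hcN
  have hsub : cN ≤ cA := by
    rcases Nat.eq_zero_or_pos n with h0 | h0
    · simp [hcN, h0]
    · have : (0:Int) < (n:Int) := by exact_mod_cast h0
      rw [hcA, if_pos this]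
      have e : ((n:Int) - 0 + (mn:Int) - 1) = ((n + mn - 1 : Nat) : Int) := by push_cast; omega
      rw [e, ← Int.natCast_ediv, Int.toNat_natCast]
      exact Nat.div_le_div_right (by omega)
  have hzero : ∀ x ∈ Finset.range cA, x ∉ Finset.range cN →
      (if (((s.drop (mn*x)).take mn).length : Int) = (mn : Int) then
        match PySem.List.min? ((s.drop (mn*x)).take mn) (fun x => x) with
        | some v => v * (mn : Int)
        | none => 0
      else 0) = 0 := by
    intro x _ hx
    have hxge : cN ≤ x := by simpa [Finset.mem_range, Nat.not_lt] using hx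
    have hnf : n < mn * x + mn := by
      by_contra hcon
      have hring : (x+1) * mn = mn*x + mn := by ring
      have h2 : (x+1) * mn ≤ n := by omega
      have := (Nat.le_div_iff_mul_le h1).mpr h2
      omega
    have hlen : ((s.drop (mn*x)).take mn).length = n - mn*x := by
      simp [hn.symm]; omega
    rw [if_neg]
    rw [hlen]
    intro hcast
    have : n - mn*x = mn := by exact_mod_cast hcast
    omega
  rw [← Finset.sum_subset (by intro y hy; simp only [Finset.mem_range] at *; omega) hzero]
  rw [Finset.sum_mul]
  apply Finset.sum_congr rfl
  intro x hx
  have hxlt : x < cN := Finset.mem_range.mp hx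
  have hfull : mn * x + mn ≤ n := by
    have h2 : x + 1 ≤ cN := by omega
    have h3 := (Nat.le_div_iff_mul_le h1).mp h2
    have hring : (x+1) * mn = mn*x + mn := by ring
    omega
  have hlen : ((s.drop (mn*x)).take mn).length = mn := by
    simp [hn.symm]; omega
  rw [if_pos (by rw [hlen])]
  have hpc : List.Pairwise (fun a b => b ≤ a) ((s.drop (mn*x)).take mn) :=
    hp.sublist ((List.take_sublist _ _).trans (List.drop_sublist _ _))
  rw [min_last _ hpc (by omega)]
  show (((s.drop (mn*x)).take mn)[((s.drop (mn*x)).take mn).length - 1]'(by omega)) * (mn:Int)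
      = s.getD (mn * x + mn - 1) 0 * (mn : Int)
  congr 1
  rw [List.getElem_take, List.getElem_drop, List.getD_eq_getElem]
  · congr 1; omega
  · omega

theorem solution_eq (k m : Int) (score : List Int) (hm : m ≠ 0) :
    solution k m score = solution_alt k m score := by
  have hrange0 : m < 0 → PySem.List.pyRange 0 (PySem.List.len (PySem.List.sorted score (fun x => x) true)) m = [] := by
    intro hneg
    rw [PySem.List.len_eq]
    unfold PySem.List.pyRange
    rw [if_neg hm, if_neg (by omega : ¬ (0:Int) < m),
        if_neg (by omega : ¬ ((PySem.List.sorted score (fun x => x) true).length : Int) < 0)]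
    simp
  rcases lt_or_gt_of_ne hm with hneg | hpos
  · -- m < 0: range(0, n, m) is empty, so A returns 0; B's guard returns 0
    simp only [solution, solution_alt, hrange0 hneg]
    simp [not_lt.mpr (le_of_lt hneg)]
  · -- m > 0
    have h1 : 1 ≤ m.toNat := by omega
    have hmn : m = (m.toNat : Int) := by omega
    set mn := m.toNat
    have hp : List.Pairwise (fun (a b : Int) => b ≤ a) (PySem.List.sorted score (fun x => x) true) := by
      simpa using PySem.List.sorted_pairwise_rev score (fun x : Int => x)
    simp only [solution, solution_alt, if_pos hpos]
    rw [hmn, solA _ mn h1 hp, sliceB _ mn h1]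
    exact (mul_comm _ _)

-- ===== VERDICT (by name: the statement is the Claim_ definition above) =====
theorem solution_spec : Claim_equal_solution := by
  intro k m score _ hm
  unfold Spec_solution
  exact solution_eq k m score hm
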